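-- pv_equiv track=rewrite | github.com/kitihounel/competitive-programming-africa | west-africa/2020/contest/graph.py | find_spanning_tree
-- ===== SOURCE A (Python) =====
-- class UnionFind:
--     def __init__(self):
--         self.weights = {}
--         self.parents = {}
--
--     def __getitem__(self, i):
--        # Check for previously unknown object.
--         if i not in self.parents:
--             self.parents[i] = i
--             self.weights[i] = 1
--             return i
--
--         # Find path of objects leading to the root.
--         path = [i]
--         root = self.parents[i]
--         while root != path[-1]:
--             path.append(root)
--             root = self.parents[root]
--
--         # Compress the path and return.
--         for ancestor in path:
--             self.parents[ancestor] = root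
--         return root
--
--     def union(self, i, j):
--         x, y = self[i], self[j]
--         if x != y:
--             r, d = (x, y) if self.weights[x] > self.weights[y] else (y, x)
--             self.weights[r] += self.weights[d]
--             self.parents[d] = r
--             root = r
--         else:
--             root = x
--         return root
--
--     def union_all(self, *objects):
--         roots = [self[x] for x in objects]
--         heaviest = max([(self.weights[r], r) for r in roots])[1]
--         for r in roots:
--             if r != heaviest:
--                 self.weights[heaviest] += self.weights[r]
--                 self.parents[r] = heaviest
--         return heaviest
--
-- def find_spanning_tree(edges):
--     ds = UnionFind()
--     tree = []
--     for e in edges: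
--         u, v, _ = e
--         p, q = ds[u], ds[v]
--         if p != q:
--             ds.union(p, q)
--             tree.append(e)
--     return tree
-- ===== SOURCE B (Python) =====
-- def find_spanning_tree(edges):
--     # Quick-find: map node -> component label; merge by relabelling one component.
--     label = {}
--     tree = []
--     for e in edges:
--         u, v, _ = e
--         if u not in label:
--             label[u] = u
--         if v not in label:
--             label[v] = v
--         lu, lv = label[u], label[v]
--         if lu != lv:
--             for x in label:
--                 if label[x] == lv:
--                     label[x] = lu
--             tree.append(e)
--     return tree
-- ===== Notes on version B (the rewrite author's own statement) =====
-- stated objective: alternative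
-- what changed: Replaces the union-find forest (parent pointers, path compression, union by weight) with a quick-find structure: a single node->component-label dict, merging by relabelling the absorbed component, with no find loop and no weights.
import Mathlib
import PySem

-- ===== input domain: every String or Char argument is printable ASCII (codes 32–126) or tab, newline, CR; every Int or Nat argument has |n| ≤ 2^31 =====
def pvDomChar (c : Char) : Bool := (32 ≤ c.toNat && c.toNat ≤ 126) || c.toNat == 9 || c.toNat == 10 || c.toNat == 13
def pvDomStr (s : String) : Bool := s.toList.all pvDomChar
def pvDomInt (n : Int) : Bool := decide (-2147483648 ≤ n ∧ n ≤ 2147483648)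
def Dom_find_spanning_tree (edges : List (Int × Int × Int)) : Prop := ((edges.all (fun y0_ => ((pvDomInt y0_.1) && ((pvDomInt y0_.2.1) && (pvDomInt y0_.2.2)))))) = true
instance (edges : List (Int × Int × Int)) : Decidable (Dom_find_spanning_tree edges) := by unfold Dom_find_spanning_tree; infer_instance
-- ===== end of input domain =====

-- B replaces A's union-find forest (parent pointers, weights, path compression) by a
-- quick-find node->label dict merged by relabelling; same return value; no speed claim.

-- ===== PORT A =====
-- UnionFind state is the pair (weights, parents).  ufFindLoop is the
-- `while root != path[-1]` loop of __getitem__; `path` is kept reversed (head = path[-1]);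
-- the fuel (= number of keys) is only a totality guard, proved sufficient below.
def ufFindLoop (parents : PySem.Dict Int Int) : Nat → List Int → Int → List Int × Int
  | 0, path, root => (path, root)
  | Nat.succ fuel, path, root =>
      if root ≠ path.headI then
        ufFindLoop parents fuel (root :: path) (parents.getD root root)
      else (path, root)

-- ds[i]  (UnionFind.__getitem__); returns (root, weights', parents').
-- `parents[root]` inside the loop is read with getD (the key is always present on reachable states).
def ufGet (weights parents : PySem.Dict Int Int) (i : Int) :
    Int × PySem.Dict Int Int × PySem.Dict Int Int :=
  match parents.get? i with
  | none => (i, weights.insert i 1, parents.insert i i)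
  | some r0 =>
      let pr := ufFindLoop parents parents.size [i] r0
      (pr.2, weights, pr.1.foldl (fun d a => d.insert a pr.2) parents)

-- ds.union(i, j)
def ufUnion (weights parents : PySem.Dict Int Int) (i j : Int) :
    Int × PySem.Dict Int Int × PySem.Dict Int Int :=
  let gx := ufGet weights parents i
  let gy := ufGet gx.2.1 gx.2.2 j
  if gx.1 ≠ gy.1 then
    let rd := if gy.2.1.getD gx.1 0 > gy.2.1.getD gy.1 0 then (gx.1, gy.1) else (gy.1, gx.1)
    (rd.1, gy.2.1.insert rd.1 (gy.2.1.getD rd.1 0 + gy.2.1.getD rd.2 0), gy.2.2.insert rd.2 rd.1)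
  else (gx.1, gy.2.1, gy.2.2)

-- the body of `for e in edges: ...`
def ufStep (st : (PySem.Dict Int Int × PySem.Dict Int Int) × List (Int × Int × Int))
    (e : Int × Int × Int) : (PySem.Dict Int Int × PySem.Dict Int Int) × List (Int × Int × Int) :=
  let g1 := ufGet st.1.1 st.1.2 e.1
  let g2 := ufGet g1.2.1 g1.2.2 e.2.1
  if g1.1 ≠ g2.1 then
    let un := ufUnion g2.2.1 g2.2.2 g1.1 g2.1
    ((un.2.1, un.2.2), st.2 ++ [e])
  else ((g2.2.1, g2.2.2), st.2)

def find_spanning_tree (edges : List (Int × Int × Int)) : List (Int × Int × Int) :=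
  (edges.foldl ufStep ((∅, ∅), [])).2

-- ===== PORT B =====
-- `if x not in label: label[x] = x`
def qfAdd (label : PySem.Dict Int Int) (x : Int) : PySem.Dict Int Int :=
  if (label.get? x).isNone then label.insert x x else label

-- `for x in label: if label[x] == lv: label[x] = lu`  (values rewritten in place)
def qfRelabel (label : PySem.Dict Int Int) (lv lu : Int) : PySem.Dict Int Int :=
  PySem.Dict.mk (label.items.map (fun kv => (kv.1, if kv.2 = lv then lu else kv.2)))

def qfStep (st : PySem.Dict Int Int × List (Int × Int × Int)) (e : Int × Int × Int) :
    PySem.Dict Int Int × List (Int × Int × Int) :=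
  let l2 := qfAdd (qfAdd st.1 e.1) e.2.1
  if l2.getD e.1 0 ≠ l2.getD e.2.1 0 then (qfRelabel l2 (l2.getD e.2.1 0) (l2.getD e.1 0), st.2 ++ [e])
  else (l2, st.2)

def find_spanning_tree_alt (edges : List (Int × Int × Int)) : List (Int × Int × Int) :=
  (edges.foldl qfStep (∅, [])).2

-- ===== PRECONDITION & SPEC =====
def Spec_find_spanning_tree (edges : List (Int × Int × Int)) (out : List (Int × Int × Int)) : Prop := out = find_spanning_tree_alt edges
instance (edges : List (Int × Int × Int)) (out : List (Int × Int × Int)) : Decidable (Spec_find_spanning_tree edges out) := by unfold Spec_find_spanning_tree; infer_instance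

-- ===== CLAIM (what is proved, stated in full; the proofs are below) =====
def Claim_equal_find_spanning_tree : Prop := ∀ (edges : List (Int × Int × Int)), Dom_find_spanning_tree edges → Spec_find_spanning_tree edges (find_spanning_tree edges)

-- ===== LEMMAS AND PROOFS =====

-- parent function of A's forest: parents[x] (x itself when absent)
def pvPf (p : PySem.Dict Int Int) (x : Int) : Int := p.getD x x

def pvIter (p : PySem.Dict Int Int) : Nat → Int → Int
  | 0, x => x
  | Nat.succ n, x => pvIter p n (pvPf p x)

-- x is a root
def pvFix (p : PySem.Dict Int Int) (x : Int) : Prop := pvPf p x = x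

-- simulation invariant between A's parents dict p and B's label dict l
structure pvInv (p l : PySem.Dict Int Int) : Prop where
  keys_eq : ∀ x : Int, (p.get? x).isSome = (l.get? x).isSome
  nodupP : p.keys.Nodup
  nodupL : l.keys.Nodup
  closure : ∀ x : Int, (p.get? x).isSome → (p.get? (pvPf p x)).isSome
  compat : ∀ x : Int, (p.get? x).isSome → l.getD (pvPf p x) 0 = l.getD x 0
  rootinj : ∀ x y : Int, (p.get? x).isSome → (p.get? y).isSome → pvFix p x → pvFix p y →
      l.getD x 0 = l.getD y 0 → x = y
  reach : ∀ x : Int, (p.get? x).isSome → ∃ k, pvFix p (pvIter p k x)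
  lab_mem : ∀ x : Int, (l.get? x).isSome → (l.get? (l.getD x 0)).isSome

theorem pv_get?_empty (x : Int) : ((∅ : PySem.Dict Int Int).get? x) = none := rfl

theorem pvInv_empty : pvInv ∅ ∅ := by
  constructor
  · exact fun x => rfl
  · exact List.nodup_nil
  · exact List.nodup_nil
  · intro x hx; rw [pv_get?_empty] at hx; simp at hx
  · intro x hx; rw [pv_get?_empty] at hx; simp at hx
  · intro x y hx _ _ _ _; rw [pv_get?_empty] at hx; simp at hx
  · intro x hx; rw [pv_get?_empty] at hx; simp at hx
  · intro x hx; rw [pv_get?_empty] at hx; simp at hx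

-- ======== generic small lemmas ========

theorem pvIter_add (p : PySem.Dict Int Int) (m n : Nat) (x : Int) :
    pvIter p (m + n) x = pvIter p n (pvIter p m x) := by
  induction m generalizing x n with
  | zero => simp [pvIter]
  | succ m ih =>
      have h1 : m + 1 + n = (m + n) + 1 + 0 := by omega
      rw [h1]
      show pvIter p ((m + n) + 1) x = _
      show pvIter p (m + n) (pvPf p x) = _
      rw [ih]
      rfl

theorem pvIter_succ' (p : PySem.Dict Int Int) (m : Nat) (x : Int) :
    pvIter p (m + 1) x = pvPf p (pvIter p m x) := by
  have h := pvIter_add p m 1 x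
  simpa [pvIter] using h

theorem pvIter_mem (p : PySem.Dict Int Int) (hc : ∀ x, (p.get? x).isSome → (p.get? (pvPf p x)).isSome)
    (x : Int) (hx : (p.get? x).isSome) (k : Nat) : (p.get? (pvIter p k x)).isSome := by
  induction k generalizing x with
  | zero => exact hx
  | succ k ih =>
      show (p.get? (pvIter p k (pvPf p x))).isSome
      exact ih (pvPf p x) (hc x hx)

-- labels are constant along parent chains
theorem pvIter_label (p l : PySem.Dict Int Int) (h : pvInv p l) (x : Int)
    (hx : (p.get? x).isSome) (k : Nat) : l.getD (pvIter p k x) 0 = l.getD x 0 := by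
  induction k generalizing x with
  | zero => rfl
  | succ k ih =>
      show l.getD (pvIter p k (pvPf p x)) 0 = l.getD x 0
      rw [ih (pvPf p x) (h.closure x hx)]
      exact h.compat x hx

-- a fixpoint is reached within fewer than `size` steps
-- if the chain repeats with period d from index m on, every later index is d-periodic
theorem pv_period (p : PySem.Dict Int Int) (x : Int) (m d : Nat)
    (hper : pvIter p (m + d) x = pvIter p m x) :
    ∀ a, m ≤ a → pvIter p (a + d) x = pvIter p a x := by
  intro a ha
  induction a with
  | zero =>
      have : m = 0 := Nat.le_zero.mp ha
      rw [this] at hper; exact hper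
  | succ a ih =>
      rcases Nat.lt_or_ge m (a + 1) with hm | hm
      · have ha' : m ≤ a := by omega
        have : a + 1 + d = (a + d) + 1 := by omega
        rw [this, pvIter_succ', ih ha', ← pvIter_succ']
      · have : m = a + 1 := by omega
        rw [this] at hper; exact hper

theorem pv_reach_bound (p l : PySem.Dict Int Int) (h : pvInv p l) (x : Int)
    (hx : (p.get? x).isSome) : ∃ k, k < p.size ∧ pvFix p (pvIter p k x) ∧
      ∀ m < k, pvIter p (m + 1) x ≠ pvIter p m x := by
  obtain ⟨k1, hk1⟩ := h.reach x hx
  have hex : ∃ k, pvFix p (pvIter p k x) := ⟨k1, hk1⟩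
  classical
  let k0 := Nat.find hex
  have hfix : pvFix p (pvIter p k0 x) := Nat.find_spec hex
  have hmin : ∀ m < k0, ¬ pvFix p (pvIter p m x) := fun m hm => Nat.find_min hex hm
  refine ⟨k0, ?_, hfix, ?_⟩
  · -- pigeonhole: the first k0+1 chain elements are distinct keys of p
    have hnd : ((List.range (k0 + 1)).map (fun m => pvIter p m x)).Nodup := by
      refine List.Nodup.map_on ?_ (List.nodup_range)
      intro a ha b hb hab
      simp only [List.mem_range] at ha hb
      by_contra hne
      -- wlog a < b
      rcases Nat.lt_or_ge a b with hlt | hge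
      · have hper := pv_period p x a (b - a) (by rw [Nat.add_sub_cancel' (Nat.le_of_lt hlt)]; exact hab.symm)
        have h2 : pvIter p ((k0 - (b - a)) + (b - a)) x = pvIter p (k0 - (b - a)) x :=
          hper (k0 - (b - a)) (by omega)
        have h3 : (k0 - (b - a)) + (b - a) = k0 := by omega
        rw [h3] at h2
        exact hmin (k0 - (b - a)) (by omega) (by rw [h2] at hfix; exact hfix)
      · have hlt : b < a := by omega
        have hper := pv_period p x b (a - b) (by rw [Nat.add_sub_cancel' (Nat.le_of_lt hlt)]; exact hab)
        have h2 : pvIter p ((k0 - (a - b)) + (a - b)) x = pvIter p (k0 - (a - b)) x :=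
          hper (k0 - (a - b)) (by omega)
        have h3 : (k0 - (a - b)) + (a - b) = k0 := by omega
        rw [h3] at h2
        exact hmin (k0 - (a - b)) (by omega) (by rw [h2] at hfix; exact hfix)
    have hsub : ((List.range (k0 + 1)).map (fun m => pvIter p m x)) ⊆ p.keys := by
      intro a ha
      simp only [List.mem_map, List.mem_range] at ha
      obtain ⟨m, _, rfl⟩ := ha
      have := pvIter_mem p h.closure x hx m
      by_contra hmem
      rw [(PySem.Dict.get?_eq_none_iff_not_mem_keys _ _).mpr hmem] at this
      simp at this
    have hlen := (hnd.subperm hsub).length_le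
    simp only [List.length_map, List.length_range] at hlen
    have hsz : p.keys.length = p.size := by
      simp [PySem.Dict.keys, PySem.Dict.size]
    omega
  · intro m hm heq
    refine hmin m hm ?_
    show pvPf p (pvIter p m x) = pvIter p m x
    rw [← pvIter_succ']
    exact heq

-- getD after an all-same-value insert fold
theorem pv_foldl_insert_getD (r z dz : Int) (path : List Int) (p : PySem.Dict Int Int) :
    (path.foldl (fun d a => d.insert a r) p).getD z dz = if z ∈ path then r else p.getD z dz := by
  induction path generalizing p with
  | nil => simp
  | cons a path ih =>
      simp only [List.foldl_cons, ih, List.mem_cons]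
      by_cases hz : z ∈ path
      · simp [hz]
      · by_cases hza : z = a <;> simp [hz, hza, PySem.Dict.getD_insert]

theorem pv_foldl_insert_get?_isSome (r z : Int) (path : List Int) (p : PySem.Dict Int Int) :
    ((path.foldl (fun d a => d.insert a r) p).get? z).isSome =
      (decide (z ∈ path) || (p.get? z).isSome) := by
  induction path generalizing p with
  | nil => simp
  | cons a path ih =>
      simp only [List.foldl_cons, ih, List.mem_cons, PySem.Dict.get?_insert]
      by_cases hza : z = a <;> simp [hza]

-- inserting the key with its current value changes nothing
theorem pv_insert_self (d : PySem.Dict Int Int) (k v : Int)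
    (hg : d.get? k = some v) (hnd : d.keys.Nodup) : d.insert k v = d := by
  apply PySem.Dict.ext
  rw [PySem.Dict.items_insert_of_contains]
  · rw [show d.items = List.map id d.items from (List.map_id d.items).symm]
    rw [List.map_map]
    apply List.map_congr_left
    intro q hq
    simp only [Function.comp, id]
    by_cases hk : (q.1 == k) = true
    · have h1 := PySem.Dict.get?_of_mem_items d (k := q.1) (v := q.2) (by simpa using hq) hnd
      have h2 : q.1 = k := by simpa using hk
      rw [h2] at h1
      rw [hg] at h1
      have : q.2 = v := by injection h1.symm
      rw [hk, if_pos rfl]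
      rw [← h2, ← this]
    · simp [hk]
  · rw [PySem.Dict.contains_eq_isSome_get?, hg]
    rfl

-- qfAdd facts
theorem pv_qfAdd_getD (l : PySem.Dict Int Int) (x z : Int) (hz : (l.get? z).isSome) :
    (qfAdd l x).getD z 0 = l.getD z 0 := by
  unfold qfAdd
  by_cases hx : (l.get? x).isNone
  · rw [if_pos hx, PySem.Dict.getD_insert, if_neg ?_]
    intro hzx
    rw [hzx] at hz
    rw [Option.isNone_iff_eq_none.mp hx] at hz
    simp at hz
  · rw [if_neg hx]

-- pvIter ignores a freshly inserted singleton on old keys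
theorem pv_iter_insert_fresh (p : PySem.Dict Int Int) (x : Int) (hx : p.get? x = none)
    (hc : ∀ z, (p.get? z).isSome → (p.get? (pvPf p z)).isSome) (k : Nat) :
    ∀ z, (p.get? z).isSome → pvIter (p.insert x x) k z = pvIter p k z := by
  induction k with
  | zero => intro z _; rfl
  | succ k ih =>
      intro z hz
      have hzx : z ≠ x := by
        intro hzx; rw [hzx, hx] at hz; simp at hz
      have hpf : pvPf (p.insert x x) z = pvPf p z := by
        unfold pvPf
        rw [PySem.Dict.getD_insert, if_neg hzx]
      show pvIter (p.insert x x) k (pvPf (p.insert x x) z) = pvIter p k (pvPf p z)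
      rw [hpf]
      exact ih (pvPf p z) (hc z hz)

-- ======== the find loop ========

theorem pv_findLoop (p : PySem.Dict Int Int) (x : Int)
    (fuel : Nat) : ∀ (t : Nat) (path : List Int) (root : Int),
    path ≠ [] →
    path.headI = pvIter p t x →
    (∀ a, a ∈ path ↔ ∃ m ≤ t, a = pvIter p m x) →
    (∀ m < t, pvIter p (m + 1) x ≠ pvIter p m x) →
    root = pvIter p (t + 1) x →
    (∃ k ≤ t + fuel, pvFix p (pvIter p k x)) →
    ∃ s, t ≤ s ∧ s ≤ t + fuel ∧ pvFix p (pvIter p s x) ∧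
      (∀ m < s, pvIter p (m + 1) x ≠ pvIter p m x) ∧
      (ufFindLoop p fuel path root).2 = pvIter p s x ∧
      (∀ a, a ∈ (ufFindLoop p fuel path root).1 ↔ ∃ m ≤ s, a = pvIter p m x) := by
  induction fuel with
  | zero =>
      intro t path root hne hhead hmem hstop hroot hreach
      obtain ⟨k, hk, hfix⟩ := hreach
      have hkt : k = t := by
        rcases Nat.lt_or_ge k t with hlt | hge
        · exact absurd (by rw [pvIter_succ', hfix]) (hstop k hlt)
        · omega
      subst hkt
      refine ⟨k, le_refl _, by omega, hfix, hstop, ?_, ?_⟩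
      · show root = pvIter p k x
        rw [hroot, pvIter_succ', hfix]
      · exact hmem
  | succ fuel ih =>
      intro t path root hne hhead hmem hstop hroot hreach
      simp only [ufFindLoop]
      by_cases hcond : root ≠ path.headI
      · rw [if_pos hcond]
        have hne' : pvIter p (t + 1) x ≠ pvIter p t x := by
          rw [← hroot, ← hhead]; exact hcond
        have hstep := ih (t + 1) (root :: path) (p.getD root root)
          (by simp)
          (by rw [List.headI_cons, hroot])
          (by
            intro a
            simp only [List.mem_cons, hmem]
            constructor
            · rintro (rfl | ⟨m, hm, rfl⟩)
              · exact ⟨t + 1, le_refl _, hroot⟩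
              · exact ⟨m, by omega, rfl⟩
            · rintro ⟨m, hm, rfl⟩
              rcases Nat.lt_or_ge m (t + 1) with hmt | hmt
              · exact Or.inr ⟨m, by omega, rfl⟩
              · have : m = t + 1 := by omega
                rw [this, ← hroot]
                exact Or.inl rfl)
          (by
            intro m hm
            rcases Nat.lt_or_ge m t with hmt | hmt
            · exact hstop m hmt
            · have : m = t := by omega
              rw [this]; exact hne')
          (by
            show pvPf p root = _
            rw [hroot, ← pvIter_succ'])
          (by obtain ⟨k, hk, hfix⟩ := hreach; exact ⟨k, by omega, hfix⟩)
        obtain ⟨s, hs1, hs2, hs3, hs4, hs5, hs6⟩ := hstep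
        exact ⟨s, by omega, by omega, hs3, hs4, hs5, hs6⟩
      · rw [if_neg hcond]
        rw [not_not] at hcond
        have hfix : pvFix p (pvIter p t x) := by
          show pvPf p (pvIter p t x) = pvIter p t x
          rw [← pvIter_succ', ← hroot, hcond, hhead]
        refine ⟨t, le_refl _, by omega, hfix, hstop, ?_, hmem⟩
        show root = pvIter p t x
        rw [hcond, hhead]

-- reachability of a root survives a pointer update that sends a region S straight to a root
theorem pv_reach_transfer (p p2 : PySem.Dict Int Int) (S : Int → Prop) (ρ : Int)
    (hpfS : ∀ z, S z → pvPf p2 z = ρ)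
    (hpfN : ∀ z, ¬ S z → pvPf p2 z = pvPf p z)
    (hρfix : pvFix p2 ρ) :
    ∀ k z, pvFix p (pvIter p k z) → ∃ k', pvFix p2 (pvIter p2 k' z) := by
  intro k
  induction k with
  | zero =>
      intro z hz
      by_cases hS : S z
      · refine ⟨1, ?_⟩
        show pvFix p2 (pvIter p2 0 (pvPf p2 z))
        rw [show pvIter p2 0 (pvPf p2 z) = pvPf p2 z from rfl, hpfS z hS]
        exact hρfix
      · refine ⟨0, ?_⟩
        show pvPf p2 z = z
        rw [hpfN z hS]
        exact hz
  | succ k ih =>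
      intro z hz
      by_cases hS : S z
      · refine ⟨1, ?_⟩
        show pvFix p2 (pvIter p2 0 (pvPf p2 z))
        rw [show pvIter p2 0 (pvPf p2 z) = pvPf p2 z from rfl, hpfS z hS]
        exact hρfix
      · by_cases hfz : pvFix p z
        · refine ⟨0, ?_⟩
          show pvPf p2 z = z
          rw [hpfN z hS]
          exact hfz
        · have hz' : pvFix p (pvIter p k (pvPf p z)) := hz
          obtain ⟨k', hk'⟩ := ih (pvPf p z) hz'
          refine ⟨k' + 1, ?_⟩
          show pvFix p2 (pvIter p2 k' (pvPf p2 z))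
          rw [hpfN z hS]
          exact hk'


-- main get spec, new-node case and known-node case handled together
theorem pv_ufGet_inv (w p l : PySem.Dict Int Int) (h : pvInv p l) (x : Int) :
    pvInv (ufGet w p x).2.2 (qfAdd l x) ∧
    (((ufGet w p x).2.2).get? x).isSome ∧
    ((((ufGet w p x).2.2).get? (ufGet w p x).1).isSome ∧ pvFix (ufGet w p x).2.2 (ufGet w p x).1) ∧
    (qfAdd l x).getD (ufGet w p x).1 0 = (qfAdd l x).getD x 0 ∧
    (∀ z, (p.get? z).isSome → ((((ufGet w p x).2.2).get? z).isSome ∧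
        (pvFix (ufGet w p x).2.2 z ↔ pvFix p z))) := by
  by_cases hpx : (p.get? x).isSome
  · -- known node: run the find loop and compress
    obtain ⟨r0, hr0⟩ := Option.isSome_iff_exists.mp hpx
    have hr0pf : r0 = pvPf p x := by
      unfold pvPf
      rw [PySem.Dict.getD_eq_get?_getD, hr0]
      rfl
    have hlx : (l.get? x).isSome := by rw [← h.keys_eq]; exact hpx
    have hqf : qfAdd l x = l := by
      unfold qfAdd
      obtain ⟨v, hv⟩ := Option.isSome_iff_exists.mp hlx
      rw [hv]
      simp
    have hget : ufGet w p x =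
        (let pr := ufFindLoop p p.size [x] r0
         (pr.2, w, pr.1.foldl (fun d a => d.insert a pr.2) p)) := by
      unfold ufGet
      rw [hr0]
    obtain ⟨kb, hkb_lt, hkb_fix, _⟩ := pv_reach_bound p l h x hpx
    obtain ⟨s, _, _, hsfix, hsstop, hres2, hres1⟩ :=
      pv_findLoop p x p.size 0 [x] r0 (by simp)
        (by rfl)
        (by
          intro a
          simp only [List.mem_singleton]
          constructor
          · rintro rfl; exact ⟨0, le_refl _, rfl⟩
          · rintro ⟨m, hm, rfl⟩
            have : m = 0 := Nat.le_zero.mp hm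
            rw [this]; rfl)
        (fun m hm => absurd hm (Nat.not_lt_zero m))
        (by exact hr0pf)
        ⟨kb, by omega, hkb_fix⟩
    set pr := ufFindLoop p p.size [x] r0 with hpr
    set ρ := pvIter p s x with hρ
    rw [hget]
    show pvInv (pr.1.foldl (fun d a => d.insert a pr.2) p) (qfAdd l x) ∧
      ((pr.1.foldl (fun d a => d.insert a pr.2) p).get? x).isSome ∧
      (((pr.1.foldl (fun d a => d.insert a pr.2) p).get? pr.2).isSome ∧
        pvFix (pr.1.foldl (fun d a => d.insert a pr.2) p) pr.2) ∧
      (qfAdd l x).getD pr.2 0 = (qfAdd l x).getD x 0 ∧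
      (∀ z, (p.get? z).isSome →
        (((pr.1.foldl (fun d a => d.insert a pr.2) p).get? z).isSome ∧
          (pvFix (pr.1.foldl (fun d a => d.insert a pr.2) p) z ↔ pvFix p z)))
    rw [hqf, hres2]
    set p' := pr.1.foldl (fun d a => d.insert a ρ) p with hp'2
    have hmem_some : ∀ a ∈ pr.1, (p.get? a).isSome := by
      intro a ha
      obtain ⟨m, _, rfl⟩ := (hres1 a).mp ha
      exact pvIter_mem p h.closure x hpx m
    have hρmem : ρ ∈ pr.1 := (hres1 ρ).mpr ⟨s, le_refl _, rfl⟩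
    have hxmem : x ∈ pr.1 := (hres1 x).mpr ⟨0, Nat.zero_le _, rfl⟩
    have hρsome : (p.get? ρ).isSome := hmem_some ρ hρmem
    have hpf' : ∀ z, pvPf p' z = if z ∈ pr.1 then ρ else pvPf p z := by
      intro z
      exact pv_foldl_insert_getD ρ z z pr.1 p
    have hsome' : ∀ z, (p'.get? z).isSome = (p.get? z).isSome := by
      intro z
      rw [hp'2, pv_foldl_insert_get?_isSome]

      by_cases hz : z ∈ pr.1
      · rw [hmem_some z hz]; simp [hz]
      · simp [hz]
    have hfixpath : ∀ z ∈ pr.1, (pvFix p z ↔ z = ρ) := by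
      intro z hz
      obtain ⟨m, hm, rfl⟩ := (hres1 z).mp hz
      constructor
      · intro hf
        rcases Nat.lt_or_ge m s with hms | hms
        · exact absurd (by rw [pvIter_succ', hf]) (hsstop m hms)
        · have : m = s := by omega
          rw [this]
      · intro he
        rw [he]
        exact hsfix
    have hroots' : ∀ z, pvFix p' z ↔ pvFix p z := by
      intro z
      by_cases hz : z ∈ pr.1
      · unfold pvFix
        rw [hpf' z, if_pos hz]
        rw [show (pvPf p z = z ↔ z = ρ) from hfixpath z hz]
        exact ⟨fun hh => hh.symm, fun hh => hh.symm⟩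
      · unfold pvFix
        rw [hpf' z, if_neg hz]
    have hnodup' : p'.keys.Nodup :=
      PySem.Dict.nodup_keys_foldl_insert pr.1 (fun _ _ => ρ) p h.nodupP
    have hfixρ' : pvFix p' ρ := by
      unfold pvFix
      rw [hpf' ρ, if_pos hρmem]
    have hlabel : ∀ z ∈ pr.1, l.getD z 0 = l.getD x 0 := by
      intro z hz
      obtain ⟨m, _, rfl⟩ := (hres1 z).mp hz
      exact pvIter_label p l h x hpx m
    refine ⟨⟨?_, hnodup', h.nodupL, ?_, ?_, ?_, ?_, h.lab_mem⟩, ?_, ⟨?_, hfixρ'⟩, ?_, ?_⟩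
    · intro z; rw [hsome' z]; exact h.keys_eq z
    · -- closure
      intro z hz
      rw [hsome' z] at hz
      rw [hsome', hpf' z]
      by_cases hzm : z ∈ pr.1
      · rw [if_pos hzm]; exact hρsome
      · rw [if_neg hzm]; exact h.closure z hz
    · -- compat
      intro z hz
      rw [hsome' z] at hz
      rw [hpf' z]
      by_cases hzm : z ∈ pr.1
      · rw [if_pos hzm, hlabel ρ hρmem, hlabel z hzm]
      · rw [if_neg hzm]; exact h.compat z hz
    · -- rootinj
      intro z1 z2 hz1 hz2 hf1 hf2 hleq
      rw [hsome'] at hz1 hz2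
      rw [hroots'] at hf1 hf2
      exact h.rootinj z1 z2 hz1 hz2 hf1 hf2 hleq
    · -- reach
      intro z hz
      rw [hsome' z] at hz
      obtain ⟨k, hk⟩ := h.reach z hz
      refine pv_reach_transfer p p' (fun z => z ∈ pr.1) ρ ?_ ?_ hfixρ' k z hk
      · intro z hzm; rw [hpf' z, if_pos hzm]
      · intro z hzm; rw [hpf' z, if_neg hzm]
    · rw [hsome']; exact hpx
    · rw [hsome']; exact hρsome
    · -- label of the root
      rw [hlabel ρ hρmem]
    · intro z hz
      exact ⟨by rw [hsome']; exact hz, hroots' z⟩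
  · -- unknown node: fresh singleton on both sides
    have hpxn : p.get? x = none := Option.not_isSome_iff_eq_none.mp hpx
    have hlxn : l.get? x = none := by
      have := h.keys_eq x
      rw [hpxn] at this
      cases h' : l.get? x
      · rfl
      · rw [h'] at this; simp at this
    have hget : ufGet w p x = (x, w.insert x 1, p.insert x x) := by
      unfold ufGet
      rw [hpxn]
    have hqf : qfAdd l x = l.insert x x := by
      unfold qfAdd
      rw [hlxn]
      rfl
    rw [hget, hqf]
    show pvInv (p.insert x x) (l.insert x x) ∧
      ((p.insert x x).get? x).isSome ∧
      (((p.insert x x).get? x).isSome ∧ pvFix (p.insert x x) x) ∧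
      (l.insert x x).getD x 0 = (l.insert x x).getD x 0 ∧
      (∀ z, (p.get? z).isSome →
        (((p.insert x x).get? z).isSome ∧ (pvFix (p.insert x x) z ↔ pvFix p z)))
    have hsome' : ∀ z, ((p.insert x x).get? z).isSome = (decide (z = x) || (p.get? z).isSome) := by
      intro z
      rw [PySem.Dict.get?_insert]
      by_cases hz : z = x
      · subst hz; simp
      · simp [hz]
    have hlsome' : ∀ z, ((l.insert x x).get? z).isSome = (decide (z = x) || (l.get? z).isSome) := by
      intro z
      rw [PySem.Dict.get?_insert]
      by_cases hz : z = x
      · subst hz; simp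
      · simp [hz]
    have hpf' : ∀ z, z ≠ x → pvPf (p.insert x x) z = pvPf p z := by
      intro z hz
      unfold pvPf
      rw [PySem.Dict.getD_insert, if_neg hz]
    have hpfx : pvPf (p.insert x x) x = x := by
      unfold pvPf
      rw [PySem.Dict.getD_insert, if_pos rfl]
    have hlD' : ∀ z, z ≠ x → (l.insert x x).getD z 0 = l.getD z 0 := by
      intro z hz
      rw [PySem.Dict.getD_insert, if_neg hz]
    have hlDx : (l.insert x x).getD x 0 = x := by
      rw [PySem.Dict.getD_insert, if_pos rfl]
    have hnex : ∀ z, (p.get? z).isSome → z ≠ x := by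
      intro z hz hzx
      rw [hzx, hpxn] at hz
      simp at hz
    have hlnex : ∀ z, (l.get? z).isSome → z ≠ x := by
      intro z hz hzx
      rw [hzx, hlxn] at hz
      simp at hz
    have hroots' : ∀ z, (p.get? z).isSome → (pvFix (p.insert x x) z ↔ pvFix p z) := by
      intro z hz
      unfold pvFix
      rw [hpf' z (hnex z hz)]
    refine ⟨⟨?_, PySem.Dict.nodup_keys_insert p x x h.nodupP,
        PySem.Dict.nodup_keys_insert l x x h.nodupL, ?_, ?_, ?_, ?_, ?_⟩,
      by rw [hsome']; simp, ⟨by rw [hsome']; simp, hpfx⟩, rfl, ?_⟩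
    · intro z; rw [hsome' z, hlsome' z, h.keys_eq z]
    · -- closure
      intro z hz
      rw [hsome' z] at hz
      rw [hsome']
      by_cases hzx : z = x
      · subst hzx
        rw [hpfx]
        simp
      · simp only [hzx, decide_false, Bool.false_or] at hz
        rw [hpf' z hzx]
        rw [h.closure z hz]
        simp
    · -- compat
      intro z hz
      rw [hsome' z] at hz
      by_cases hzx : z = x
      · subst hzx
        rw [hpfx]
      · simp only [hzx, decide_false, Bool.false_or] at hz
        rw [hpf' z hzx, hlD' z hzx, hlD' (pvPf p z) (hnex (pvPf p z) (h.closure z hz))]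
        exact h.compat z hz
    · -- rootinj
      intro z1 z2 hz1 hz2 hf1 hf2 hleq
      rw [hsome'] at hz1 hz2
      by_cases h1 : z1 = x <;> by_cases h2 : z2 = x
      · rw [h1, h2]
      · exfalso
        simp only [h2, decide_false, Bool.false_or] at hz2
        have hz2l : (l.get? z2).isSome := by rw [← h.keys_eq]; exact hz2
        rw [h1, hlDx, hlD' z2 h2] at hleq
        exact hlnex (l.getD z2 0) (h.lab_mem z2 hz2l) hleq.symm
      · exfalso
        simp only [h1, decide_false, Bool.false_or] at hz1
        have hz1l : (l.get? z1).isSome := by rw [← h.keys_eq]; exact hz1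
        rw [h2, hlDx, hlD' z1 h1] at hleq
        exact hlnex (l.getD z1 0) (h.lab_mem z1 hz1l) hleq
      · simp only [h1, decide_false, Bool.false_or] at hz1
        simp only [h2, decide_false, Bool.false_or] at hz2
        rw [hroots' z1 hz1] at hf1
        rw [hroots' z2 hz2] at hf2
        rw [hlD' z1 h1, hlD' z2 h2] at hleq
        exact h.rootinj z1 z2 hz1 hz2 hf1 hf2 hleq
    · -- reach
      intro z hz
      rw [hsome' z] at hz
      by_cases hzx : z = x
      · subst hzx
        exact ⟨0, hpfx⟩
      · simp only [hzx, decide_false, Bool.false_or] at hz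
        obtain ⟨k, hk⟩ := h.reach z hz
        refine ⟨k, ?_⟩
        rw [pv_iter_insert_fresh p x hpxn h.closure k z hz]
        have hmem := pvIter_mem p h.closure z hz k
        unfold pvFix
        rw [hpf' (pvIter p k z) (hnex _ hmem)]
        exact hk
    · -- lab_mem
      intro z hz
      rw [hlsome' z] at hz
      rw [hlsome']
      by_cases hzx : z = x
      · subst hzx
        rw [hlDx]
        simp
      · simp only [hzx, decide_false, Bool.false_or] at hz
        rw [hlD' z hzx]
        rw [h.lab_mem z hz]
        simp
    · -- preservation of old keys
      intro z hz
      refine ⟨by rw [hsome' z, hz]; simp, hroots' z hz⟩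

-- ======== relabel lemmas ========
-- ======== relabel lemmas ========

theorem pv_relabel_get? (l : PySem.Dict Int Int) (lv lu z : Int) :
    (qfRelabel l lv lu).get? z = (l.get? z).map (fun w => if w = lv then lu else w) := by
  obtain ⟨items⟩ := l
  induction items with
  | nil => rfl
  | cons kv rest ih =>
      obtain ⟨k, v⟩ := kv
      show (PySem.Dict.mk ((k, if v = lv then lu else v) ::
          rest.map (fun kv => (kv.1, if kv.2 = lv then lu else kv.2)))).get? z = _
      rw [PySem.Dict.get?_mk_cons, PySem.Dict.get?_mk_cons]
      by_cases hk : (k == z) = true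
      · rw [if_pos hk, if_pos hk]; rfl
      · rw [if_neg hk, if_neg hk]
        exact ih

theorem pv_relabel_get?_isSome (l : PySem.Dict Int Int) (lv lu z : Int) :
    ((qfRelabel l lv lu).get? z).isSome = (l.get? z).isSome := by
  rw [pv_relabel_get?]
  cases l.get? z <;> rfl

theorem pv_relabel_getD (l : PySem.Dict Int Int) (lv lu z : Int) (hz : (l.get? z).isSome) :
    (qfRelabel l lv lu).getD z 0 = if l.getD z 0 = lv then lu else l.getD z 0 := by
  obtain ⟨w, hw⟩ := Option.isSome_iff_exists.mp hz
  rw [PySem.Dict.getD_eq_get?_getD, PySem.Dict.getD_eq_get?_getD, pv_relabel_get?, hw]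
  rfl

theorem pv_relabel_keys (l : PySem.Dict Int Int) (lv lu : Int) :
    (qfRelabel l lv lu).keys = l.keys := by
  simp [qfRelabel, PySem.Dict.keys]

-- ======== union/merge preserves the invariant ========

theorem pv_merge_inv (p l : PySem.Dict Int Int) (h : pvInv p l) (a b lu lv : Int)
    (hca : (p.get? a).isSome) (hcb : (p.get? b).isSome)
    (hfa : pvFix p a) (hfb : pvFix p b) (hab : a ≠ b)
    (hor : (l.getD a 0 = lu ∧ l.getD b 0 = lv) ∨ (l.getD a 0 = lv ∧ l.getD b 0 = lu))
    (hlulv : lu ≠ lv) :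
    pvInv (p.insert b a) (qfRelabel l lv lu) := by
  have hab' : b ≠ a := fun hh => hab hh.symm
  have hpf : ∀ z, pvPf (p.insert b a) z = if z = b then a else pvPf p z := by
    intro z
    unfold pvPf
    rw [PySem.Dict.getD_insert]
  have hsome : ∀ z, ((p.insert b a).get? z).isSome = (p.get? z).isSome := by
    intro z
    rw [PySem.Dict.get?_insert]
    by_cases hz : z = b
    · subst hz; rw [if_pos rfl, hcb]; rfl
    · rw [if_neg hz]
  have hlsome : ∀ z, ((qfRelabel l lv lu).get? z).isSome = (l.get? z).isSome :=
    fun z => pv_relabel_get?_isSome l lv lu z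
  have hplsome : ∀ z, (p.get? z).isSome = (l.get? z).isSome := h.keys_eq
  have hlD : ∀ z, (l.get? z).isSome →
      (qfRelabel l lv lu).getD z 0 = if l.getD z 0 = lv then lu else l.getD z 0 :=
    fun z hz => pv_relabel_getD l lv lu z hz
  -- labels of a and b after the merge are both lu
  have hla : l.getD a 0 = lu ∨ l.getD a 0 = lv := by
    rcases hor with ⟨h1, _⟩ | ⟨h1, _⟩
    · exact Or.inl h1
    · exact Or.inr h1
  have hlb : l.getD b 0 = lu ∨ l.getD b 0 = lv := by
    rcases hor with ⟨_, h1⟩ | ⟨_, h1⟩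
    · exact Or.inr h1
    · exact Or.inl h1
  have habl : ∀ c, (l.get? c).isSome → l.getD c 0 = lu ∨ l.getD c 0 = lv →
      (qfRelabel l lv lu).getD c 0 = lu := by
    intro c hc hcl
    rw [hlD c hc]
    rcases hcl with h1 | h1
    · rw [h1, if_neg hlulv]
    · rw [h1, if_pos rfl]
  have hfix2 : ∀ z, pvFix (p.insert b a) z ↔ (pvFix p z ∧ z ≠ b) := by
    intro z
    unfold pvFix
    rw [hpf z]
    by_cases hz : z = b
    · subst hz
      rw [if_pos rfl]
      constructor
      · intro hh; exact absurd hh.symm hab'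
      · intro ⟨_, hh⟩; exact absurd rfl hh
    · rw [if_neg hz]
      exact ⟨fun hh => ⟨hh, hz⟩, fun hh => hh.1⟩
  constructor
  · intro z; rw [hsome z, hlsome z]; exact hplsome z
  · exact PySem.Dict.nodup_keys_insert p b a h.nodupP
  · rw [pv_relabel_keys]; exact h.nodupL
  · -- closure
    intro z hz
    rw [hsome z] at hz
    rw [hsome, hpf z]
    by_cases hzb : z = b
    · rw [if_pos hzb]; exact hca
    · rw [if_neg hzb]; exact h.closure z hz
  · -- compat
    intro z hz
    rw [hsome z] at hz
    rw [hpf z]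
    by_cases hzb : z = b
    · rw [if_pos hzb, hzb]
      rw [habl a (by rw [← hplsome]; exact hca) hla, habl b (by rw [← hplsome]; exact hcb) hlb]
    · rw [if_neg hzb]
      have h1 := h.compat z hz
      have hzl : (l.get? z).isSome := by rw [← hplsome]; exact hz
      have hpfl : (l.get? (pvPf p z)).isSome := by rw [← hplsome]; exact h.closure z hz
      rw [hlD _ hpfl, hlD _ hzl, h1]
  · -- rootinj
    intro z1 z2 hz1 hz2 hf1 hf2 hleq
    rw [hsome] at hz1 hz2
    rw [hfix2] at hf1 hf2
    have hz1l : (l.get? z1).isSome := by rw [← hplsome]; exact hz1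
    have hz2l : (l.get? z2).isSome := by rw [← hplsome]; exact hz2
    rw [hlD _ hz1l, hlD _ hz2l] at hleq
    by_cases h1 : l.getD z1 0 = lv <;> by_cases h2 : l.getD z2 0 = lv
    · exact h.rootinj z1 z2 hz1 hz2 hf1.1 hf2.1 (by rw [h1, h2])
    · -- z1 has label lv: z1 is the root of {a, b} labelled lv, but z1 ≠ b
      exfalso
      rw [if_pos h1, if_neg h2] at hleq
      -- l z2 = lu
      have hz2lu : l.getD z2 0 = lu := hleq.symm
      rcases hor with ⟨hal, hbl⟩ | ⟨hal, hbl⟩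
      · -- l a = lu, l b = lv: z1 = b, contradiction
        exact hf1.2 (h.rootinj z1 b hz1 hcb hf1.1 hfb (by rw [h1, hbl]))
      · -- l a = lv, l b = lu: z1 = a and z2 = b, contradiction
        exact hf2.2 (h.rootinj z2 b hz2 hcb hf2.1 hfb (by rw [hz2lu, hbl]))
    · exfalso
      rw [if_neg h1, if_pos h2] at hleq
      have hz1lu : l.getD z1 0 = lu := hleq
      rcases hor with ⟨hal, hbl⟩ | ⟨hal, hbl⟩
      · exact hf2.2 (h.rootinj z2 b hz2 hcb hf2.1 hfb (by rw [h2, hbl]))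
      · exact hf1.2 (h.rootinj z1 b hz1 hcb hf1.1 hfb (by rw [hz1lu, hbl]))
    · rw [if_neg h1, if_neg h2] at hleq
      exact h.rootinj z1 z2 hz1 hz2 hf1.1 hf2.1 hleq
  · -- reach
    intro z hz
    rw [hsome z] at hz
    obtain ⟨k, hk⟩ := h.reach z hz
    refine pv_reach_transfer p (p.insert b a) (fun z => z = b) a ?_ ?_ ?_ k z hk
    · intro z hzb; rw [hpf z, if_pos hzb]
    · intro z hzb; rw [hpf z, if_neg hzb]
    · show pvPf (p.insert b a) a = a
      rw [hpf a, if_neg hab, hfa]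
  · -- lab_mem
    intro z hz
    rw [hlsome z] at hz
    rw [hlsome]
    rw [hlD z hz]
    by_cases h1 : l.getD z 0 = lv
    · rw [if_pos h1]
      rcases hor with ⟨hal, _⟩ | ⟨_, hbl⟩
      · have hca' : (l.get? a).isSome := by rw [← hplsome]; exact hca
        have hh := h.lab_mem a hca'
        rw [hal] at hh
        exact hh
      · have hcb' : (l.get? b).isSome := by rw [← hplsome]; exact hcb
        have hh := h.lab_mem b hcb'
        rw [hbl] at hh
        exact hh
    · rw [if_neg h1]
      exact h.lab_mem z hz

-- ufGet at a root with nodup keys is the identity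
theorem pv_ufGet_root (w p : PySem.Dict Int Int) (z : Int)
    (hnd : p.keys.Nodup) (hz : p.get? z = some z) : ufGet w p z = (z, w, p) := by
  unfold ufGet
  rw [hz]
  show ((ufFindLoop p p.size [z] z).2, w,
    (ufFindLoop p p.size [z] z).1.foldl (fun d a => d.insert a (ufFindLoop p p.size [z] z).2) p)
    = (z, w, p)
  have hsz : p.size ≠ 0 := by
    intro h0
    have : p.items = [] := List.length_eq_zero_iff.mp h0
    have : p = PySem.Dict.mk [] := by
      apply PySem.Dict.ext
      rw [this]
    rw [this] at hz
    exact absurd hz (by rw [show (PySem.Dict.mk ([] : List (Int × Int))).get? z = none from rfl]; simp)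
  obtain ⟨n, hn⟩ := Nat.exists_eq_succ_of_ne_zero hsz
  have hloop : ufFindLoop p p.size [z] z = ([z], z) := by
    rw [hn]
    simp only [ufFindLoop]
    rw [if_neg (by simp)]
  rw [hloop]
  show (z, w, [z].foldl (fun d a => d.insert a z) p) = (z, w, p)
  rw [show [z].foldl (fun d a => d.insert a z) p = p.insert z z from rfl]
  rw [pv_insert_self p z z hz hnd]

-- get? at a fixed contained point returns the point itself
theorem pv_get?_of_fix (p : PySem.Dict Int Int) (z : Int)
    (hc : (p.get? z).isSome) (hf : pvFix p z) : p.get? z = some z := by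
  obtain ⟨v, hv⟩ := Option.isSome_iff_exists.mp hc
  have : pvPf p z = v := by
    unfold pvPf
    rw [PySem.Dict.getD_eq_get?_getD, hv]
    rfl
  rw [hv, ← hf, this]

-- ======== main loop ========

theorem pv_step (w p l : PySem.Dict Int Int) (tr : List (Int × Int × Int)) (h : pvInv p l)
    (e : Int × Int × Int) :
    pvInv (ufStep ((w, p), tr) e).1.2 (qfStep (l, tr) e).1 ∧
    (ufStep ((w, p), tr) e).2 = (qfStep (l, tr) e).2 := by
  simp only [ufStep, qfStep]
  obtain ⟨inv1, h1x, ⟨h1ρc, h1ρf⟩, h1lab, h1pres⟩ := pv_ufGet_inv w p l h e.1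
  obtain ⟨inv2, h2x, ⟨h2ρc, h2ρf⟩, h2lab, h2pres⟩ :=
    pv_ufGet_inv (ufGet w p e.1).2.1 (ufGet w p e.1).2.2 (qfAdd l e.1) inv1 e.2.1
  set ρu := (ufGet w p e.1).1 with hρu_def
  set W1 := (ufGet w p e.1).2.1 with hW1_def
  set p1 := (ufGet w p e.1).2.2 with hp1_def
  set l1 := qfAdd l e.1 with hl1_def
  set ρv := (ufGet W1 p1 e.2.1).1 with hρv_def
  set W2 := (ufGet W1 p1 e.2.1).2.1 with hW2_def
  set p2 := (ufGet W1 p1 e.2.1).2.2 with hp2_def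
  set l2 := qfAdd l1 e.2.1 with hl2_def
  obtain ⟨hρu_c2, hρu_fix_iff⟩ := h2pres ρu h1ρc
  have hρu_fix2 : pvFix p2 ρu := hρu_fix_iff.mpr h1ρf
  have hl1ρu_some : (l1.get? ρu).isSome := by rw [← inv1.keys_eq]; exact h1ρc
  have hl1u_some : (l1.get? e.1).isSome := by rw [← inv1.keys_eq]; exact h1x
  have hl2ρu : l2.getD ρu 0 = l1.getD ρu 0 := pv_qfAdd_getD l1 e.2.1 ρu hl1ρu_some
  have hl2u : l2.getD e.1 0 = l1.getD e.1 0 := pv_qfAdd_getD l1 e.2.1 e.1 hl1u_some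
  have hlu_chain : l2.getD ρu 0 = l2.getD e.1 0 := by rw [hl2ρu, hl2u, h1lab]
  have hlv_chain : l2.getD ρv 0 = l2.getD e.2.1 0 := h2lab
  have hbranch : ρu = ρv ↔ l2.getD e.1 0 = l2.getD e.2.1 0 := by
    constructor
    · intro hh
      rw [← hlu_chain, ← hlv_chain, hh]
    · intro hh
      refine inv2.rootinj ρu ρv hρu_c2 h2ρc hρu_fix2 h2ρf ?_
      rw [hlu_chain, hlv_chain, hh]
  by_cases hcnd : ρu = ρv
  · rw [if_neg (by simpa using hcnd), if_neg (by simpa using hbranch.mp hcnd)]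
    exact ⟨inv2, rfl⟩
  · have hlne : ¬ l2.getD e.1 0 = l2.getD e.2.1 0 := fun hh => hcnd (hbranch.mpr hh)
    rw [if_pos (by simpa using hcnd), if_pos (by simpa using hlne)]
    refine ⟨?_, rfl⟩
    have hρu_get : p2.get? ρu = some ρu := pv_get?_of_fix p2 ρu hρu_c2 hρu_fix2
    have hρv_get : p2.get? ρv = some ρv := pv_get?_of_fix p2 ρv h2ρc h2ρf
    have hg1 : ufGet W2 p2 ρu = (ρu, W2, p2) := pv_ufGet_root W2 p2 ρu inv2.nodupP hρu_get
    have hg2 : ufGet W2 p2 ρv = (ρv, W2, p2) := pv_ufGet_root W2 p2 ρv inv2.nodupP hρv_get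
    have hun : ∃ a b, ((a = ρu ∧ b = ρv) ∨ (a = ρv ∧ b = ρu)) ∧
        (ufUnion W2 p2 ρu ρv).2.2 = p2.insert b a := by
      simp only [ufUnion, hg1, hg2]
      rw [if_pos (by simpa using hcnd)]
      by_cases hw : W2.getD ρu 0 > W2.getD ρv 0
      · exact ⟨ρu, ρv, Or.inl ⟨rfl, rfl⟩, by rw [if_pos hw]⟩
      · exact ⟨ρv, ρu, Or.inr ⟨rfl, rfl⟩, by rw [if_neg hw]⟩
    obtain ⟨a, b, hor, hpar⟩ := hun
    rw [hpar]
    rcases hor with ⟨rfl, rfl⟩ | ⟨rfl, rfl⟩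
    · exact pv_merge_inv p2 l2 inv2 ρu ρv (l2.getD e.1 0) (l2.getD e.2.1 0)
        hρu_c2 h2ρc hρu_fix2 h2ρf hcnd (Or.inl ⟨hlu_chain, hlv_chain⟩) hlne
    · exact pv_merge_inv p2 l2 inv2 ρv ρu (l2.getD e.1 0) (l2.getD e.2.1 0)
        h2ρc hρu_c2 h2ρf hρu_fix2 (fun hh => hcnd hh.symm)
        (Or.inr ⟨hlv_chain, hlu_chain⟩) hlne

theorem pv_loop (edges : List (Int × Int × Int)) (w p l : PySem.Dict Int Int)
    (tr : List (Int × Int × Int)) (h : pvInv p l) :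
    (edges.foldl ufStep ((w, p), tr)).2 = (edges.foldl qfStep (l, tr)).2 := by
  induction edges generalizing w p l tr with
  | nil => rfl
  | cons e es ih =>
      obtain ⟨h1, h2⟩ := pv_step w p l tr h e
      simp only [List.foldl_cons]
      calc (List.foldl ufStep (ufStep ((w, p), tr) e) es).2
          = (List.foldl ufStep (((ufStep ((w, p), tr) e).1.1, (ufStep ((w, p), tr) e).1.2),
              (ufStep ((w, p), tr) e).2) es).2 := by simp
        _ = (List.foldl qfStep ((qfStep (l, tr) e).1, (ufStep ((w, p), tr) e).2) es).2 :=
              ih _ _ _ _ h1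
        _ = (List.foldl qfStep (qfStep (l, tr) e) es).2 := by rw [h2]

-- ===== VERDICT (by name: the statement is the Claim_ definition above) =====
theorem find_spanning_tree_spec : Claim_equal_find_spanning_tree := by
  intro edges _
  unfold Spec_find_spanning_tree find_spanning_tree find_spanning_tree_alt
  exact pv_loop edges ∅ ∅ ∅ [] pvInv_empty
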